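-- pv_equiv track=rewrite | github.com/zzsfornlp/zmsp | msp2/tasks/zsfp/mtl/srl.py | simple_arg_decode
-- ===== SOURCE A (Python) =====
-- from typing import List
--
-- def simple_arg_decode(tag_idxes: List[int]):
--     spans = []
--     prev_start, prev_t = 0, 0
--     # --
--     def _close_prev(_start: int, _end: int, _t, _spans: List):
--         if _t > 0:
--             assert _end > _start
--             _spans.append((_start, _end-_start, _t))
--         return _end, 0
--     # --
--     for idx, tidx in enumerate(tag_idxes):
--         if tidx == 0 or tidx != prev_t:
--             prev_start, prev_t = _close_prev(prev_start, idx, prev_t, spans)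
--         prev_t = tidx
--     _close_prev(prev_start, len(tag_idxes), prev_t, spans)
--     return spans
-- ===== SOURCE B (Python) =====
-- def simple_arg_decode(tag_idxes):
--     # Phase 1: run-length encode the sequence into (value, length) runs.
--     runs = []
--     i, n = 0, len(tag_idxes)
--     while i < n:
--         j = i + 1
--         while j < n and tag_idxes[j] == tag_idxes[i]:
--             j += 1
--         runs.append((tag_idxes[i], j - i))
--         i = j
--     # Phase 2: single offset-accumulating pass over the runs.
--     spans = []
--     offset = 0
--     for key, length in runs:
--         if key > 0:
--             spans.append((offset, length, key))
--         offset += length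
--     return spans
-- ===== Notes on version B (the rewrite author's own statement) =====
-- stated objective: alternative
-- what changed: A's single-pass prev_start/prev_t close-span state machine is replaced by a two-phase pass: run-length encode the sequence into (value, length) runs first, then map the runs with an accumulating offset, keeping only runs with a positive tag.
import Mathlib
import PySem

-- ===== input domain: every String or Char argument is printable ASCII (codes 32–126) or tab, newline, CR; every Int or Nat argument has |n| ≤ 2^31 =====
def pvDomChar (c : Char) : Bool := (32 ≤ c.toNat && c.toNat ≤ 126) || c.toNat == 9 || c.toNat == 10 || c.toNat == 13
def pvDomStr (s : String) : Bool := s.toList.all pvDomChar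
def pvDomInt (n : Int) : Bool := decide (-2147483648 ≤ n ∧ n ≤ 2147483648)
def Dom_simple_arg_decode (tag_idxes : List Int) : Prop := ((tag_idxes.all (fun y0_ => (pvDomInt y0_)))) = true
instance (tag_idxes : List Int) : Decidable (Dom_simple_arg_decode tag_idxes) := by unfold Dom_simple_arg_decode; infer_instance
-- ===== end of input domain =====

-- B replaces A's prev_start/prev_t close-span state machine by a two-phase pass
-- (run-length encode first, then one offset-accumulating pass over the runs); 'alternative', same cost.

-- ===== PORT A =====
-- _close_prev: appends (start, end-start, t) when t > 0; returns (new spans, new prev_start = _end).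
-- (The Python 'assert _end > _start' never fires on reachable states, so A is total; it is not modelled.)
def pvCloseA (s e t : Int) (spans : List (Int × Int × Int)) : List (Int × Int × Int) × Int :=
  if t > 0 then (spans ++ [(s, e - s, t)], e) else (spans, e)

-- the 'for idx, tidx in enumerate(tag_idxes)' loop with state (prev_start, prev_t, spans)
def pvALoop (idx ps pt : Int) (spans : List (Int × Int × Int)) :
    List Int → Int × Int × List (Int × Int × Int)
  | [] => (ps, pt, spans)
  | t :: rest =>
    if t = 0 ∨ t ≠ pt then
      let c := pvCloseA ps idx pt spans
      pvALoop (idx + 1) c.2 t c.1 rest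
    else
      pvALoop (idx + 1) ps t spans rest

def simple_arg_decode (tag_idxes : List Int) : List (Int × Int × Int) :=
  let s := pvALoop 0 0 0 [] tag_idxes
  (pvCloseA s.1 (tag_idxes.length : Int) s.2.1 s.2.2).1

-- ===== PORT B =====
-- Phase 1 of Source B: run-length encode into (value, run length); the inner
-- 'while j < n and tag_idxes[j] == tag_idxes[i]' advance is the span on equality with the head.
def pvRuns : List Int → List (Int × Nat)
  | [] => []
  | x :: xs =>
    let p := xs.span (fun y => y == x)
    (x, p.1.length + 1) :: pvRuns p.2
termination_by l => l.length
decreasing_by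
  simp only [List.span_eq_takeWhile_dropWhile]
  have := List.length_dropWhile_le (fun y => y == x) xs
  simp; omega

-- Phase 2 of Source B: offset-accumulating pass over the runs
def pvBStep (st : Int × List (Int × Int × Int)) (r : Int × Nat) : Int × List (Int × Int × Int) :=
  (st.1 + (r.2 : Int), if r.1 > 0 then st.2 ++ [(st.1, (r.2 : Int), r.1)] else st.2)

def simple_arg_decode_alt (tag_idxes : List Int) : List (Int × Int × Int) :=
  ((pvRuns tag_idxes).foldl pvBStep (0, [])).2

-- ===== PRECONDITION & SPEC =====
def Spec_simple_arg_decode (tag_idxes : List Int) (out : List (Int × Int × Int)) : Prop := out = simple_arg_decode_alt tag_idxes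
instance (tag_idxes : List Int) (out : List (Int × Int × Int)) : Decidable (Spec_simple_arg_decode tag_idxes out) := by unfold Spec_simple_arg_decode; infer_instance

-- ===== CLAIM (what is proved, stated in full; the proofs are below) =====
def Claim_equal_simple_arg_decode : Prop := ∀ (tag_idxes : List Int), Dom_simple_arg_decode tag_idxes → Spec_simple_arg_decode tag_idxes (simple_arg_decode tag_idxes)

-- ===== LEMMAS AND PROOFS =====

-- A's loop followed by the final _close_prev, started at an arbitrary index/state
def pvFinishA (idx ps pt : Int) (spans : List (Int × Int × Int)) (l : List Int) :
    List (Int × Int × Int) :=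
  let s := pvALoop idx ps pt spans l
  (pvCloseA s.1 (idx + (l.length : Int)) s.2.1 s.2.2).1

theorem pvRuns_cons (x : Int) (xs : List Int) :
    pvRuns (x :: xs) =
      (x, (xs.takeWhile (fun y => y == x)).length + 1) ::
        pvRuns (xs.dropWhile (fun y => y == x)) := by
  rw [pvRuns]
  simp [List.span_eq_takeWhile_dropWhile]

theorem pvALoop_append (g r : List Int) : ∀ (idx ps pt : Int) (spans : List (Int × Int × Int)),
    pvALoop idx ps pt spans (g ++ r) =
      (let s := pvALoop idx ps pt spans g
       pvALoop (idx + (g.length : Int)) s.1 s.2.1 s.2.2 r) := by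
  induction g with
  | nil => intro idx ps pt spans; simp [pvALoop]
  | cons y ys ih =>
    intro idx ps pt spans
    simp only [List.cons_append, pvALoop]
    split
    · rw [ih]; simp; ring_nf
    · rw [ih]; simp; ring_nf

-- inside a run of a nonzero value the loop state is unchanged
theorem pvALoop_const_pos (g : List Int) (x : Int) (hx : x ≠ 0)
    (hg : ∀ y ∈ g, y = x) : ∀ (idx ps : Int) (spans : List (Int × Int × Int)),
    pvALoop idx ps x spans g = (ps, x, spans) := by
  induction g with
  | nil => intro idx ps spans; rfl
  | cons y ys ih =>
    intro idx ps spans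
    have hy : y = x := hg y (by simp)
    subst hy
    simp only [pvALoop]
    rw [if_neg (by simp [hx])]
    exact ih (fun z hz => hg z (by simp [hz])) (idx + 1) ps spans

-- inside a run of zeros only prev_start moves, and it is never used afterwards
theorem pvALoop_const_zero (g : List Int) (hg : ∀ y ∈ g, y = (0 : Int)) :
    ∀ (idx ps : Int) (spans : List (Int × Int × Int)),
    ∃ ps', pvALoop idx ps 0 spans g = (ps', 0, spans) := by
  induction g with
  | nil => exact fun idx ps spans => ⟨ps, rfl⟩
  | cons y ys ih =>
    intro idx ps spans
    have hy : y = 0 := hg y (by simp)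
    subst hy
    simp only [pvALoop, pvCloseA]
    norm_num
    exact ih (fun z hz => hg z (by simp [hz])) (idx + 1) idx spans

theorem head_dropWhile_ne (x : Int) (xs : List Int) (z : Int)
    (hz : (xs.dropWhile (fun y => y == x)).head? = some z) : z ≠ x := by
  have := List.head?_dropWhile_not (fun y => y == x) xs
  rw [hz] at this
  simpa using this

-- main invariant: A's loop + final close from any run-boundary state equals B's fold over the runs,
-- with the still-open previous span appended lazily
theorem pvFinishA_eq_bFold : ∀ (n : Nat) (l : List Int), l.length ≤ n →
    ∀ (idx ps pt : Int) (spans : List (Int × Int × Int)),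
    (∀ x, l.head? = some x → x = 0 ∨ x ≠ pt) →
    pvFinishA idx ps pt spans l =
      ((pvRuns l).foldl pvBStep
        (idx, spans ++ (if pt > 0 then [(ps, idx - ps, pt)] else []))).2 := by
  intro n
  induction n with
  | zero =>
    intro l hl idx ps pt spans _
    have : l = [] := by cases l <;> simp_all
    subst this
    simp [pvFinishA, pvALoop, pvRuns, pvCloseA]
    split <;> simp
  | succ n ih =>
    intro l hl idx ps pt spans hhead
    cases l with
    | nil =>
      simp [pvFinishA, pvALoop, pvRuns, pvCloseA]
      split <;> simp
    | cons x xs =>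
      set g := xs.takeWhile (fun y => y == x) with hgdef
      set rest := xs.dropWhile (fun y => y == x) with hrestdef
      have hxs : xs = g ++ rest := (List.takeWhile_append_dropWhile).symm
      have hg : ∀ y ∈ g, y = x := by
        intro y hy
        have := List.mem_takeWhile_imp hy
        simpa using this
      have hrlen : rest.length ≤ n := by
        have h1 : g.length + rest.length = xs.length := by
          rw [hxs]; simp
        simp at hl; omega
      have hcond : x = 0 ∨ x ≠ pt := hhead x rfl
      have htw : List.takeWhile (fun y => y == x) (g ++ rest) = g := by rw [← hxs, ← hgdef]
      have hdw : List.dropWhile (fun y => y == x) (g ++ rest) = rest := by rw [← hxs, ← hrestdef]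
      -- unfold one step of A (the boundary element closes the pending span)
      have step1 : pvFinishA idx ps pt spans (x :: xs) =
          pvFinishA (idx + 1) idx x (spans ++ (if pt > 0 then [(ps, idx - ps, pt)] else [])) xs := by
        simp only [pvFinishA, pvALoop, if_pos hcond, pvCloseA]
        split
        · simp; ring_nf
        · simp; ring_nf
      rw [step1, hxs, pvRuns_cons, htw, hdw]
      -- split the loop at the run boundary
      rw [show pvFinishA (idx + 1) idx x (spans ++ (if pt > 0 then [(ps, idx - ps, pt)] else [])) (g ++ rest) =
          (let s := pvALoop (idx + 1) idx x (spans ++ (if pt > 0 then [(ps, idx - ps, pt)] else [])) g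
           pvFinishA (idx + 1 + (g.length : Int)) s.1 s.2.1 s.2.2 rest) from by
        simp only [pvFinishA, pvALoop_append]
        simp; ring_nf]
      set sp2 := spans ++ (if pt > 0 then [(ps, idx - ps, pt)] else []) with hsp2
      by_cases hx0 : x = 0
      · subst hx0
        obtain ⟨ps', hps'⟩ := pvALoop_const_zero g (by simpa using hg) (idx + 1) idx sp2
        rw [hps']
        rw [ih rest hrlen (idx + 1 + (g.length : Int)) ps' 0 sp2
          (fun z hz => by
            by_cases hz0 : z = 0
            · exact Or.inl hz0
            · exact Or.inr hz0)]
        simp only [List.foldl_cons, pvBStep]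
        norm_num
        have e : (idx + 1 + (g.length : Int), sp2) = (idx + ((g.length : Int) + 1), sp2) := by
          rw [Prod.mk.injEq]; exact ⟨by ring, rfl⟩
        rw [e]
      · rw [pvALoop_const_pos g x hx0 hg]
        rw [ih rest hrlen (idx + 1 + (g.length : Int)) idx x sp2
          (fun z hz => Or.inr (head_dropWhile_ne x xs z (hrestdef ▸ hz)))]
        simp only [List.foldl_cons, pvBStep]
        have e : (idx + 1 + (g.length : Int),
              sp2 ++ (if x > 0 then [(idx, idx + 1 + (g.length : Int) - idx, x)] else [])) =
            (idx + (((g.length + 1 : Nat)) : Int),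
              if x > 0 then sp2 ++ [(idx, (((g.length + 1 : Nat)) : Int), x)] else sp2) := by
          have h1 : idx + (((g.length + 1 : Nat)) : Int) = idx + 1 + (g.length : Int) := by
            push_cast; ring
          have h2 : (((g.length + 1 : Nat)) : Int) = idx + 1 + (g.length : Int) - idx := by
            push_cast; ring
          rw [h1, h2]
          split_ifs <;> simp
        rw [e]

-- ===== VERDICT (by name: the statement is the Claim_ definition above) =====
theorem simple_arg_decode_spec : Claim_equal_simple_arg_decode := by
  intro tag _
  show simple_arg_decode tag = simple_arg_decode_alt tag
  have h := pvFinishA_eq_bFold tag.length tag le_rfl 0 0 0 []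
    (fun x _ => by by_cases hx : x = 0; exacts [Or.inl hx, Or.inr hx])
  simpa [pvFinishA, simple_arg_decode, simple_arg_decode_alt] using h
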